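-- pv_equiv track=rewrite | github.com/a-gavriel/Python-Games | Clases/Externo/padovan.py | padovan_r
-- ===== SOURCE A (Python) =====
-- def padovan_r(in_,out_= ""):
--   rules = {"A": "B", "B": "C", "C": "AB"}
--   if (in_ == ""):
--     return out_
--   else:
--     out_ = rules[ in_[-1] ] + out_
--     in_ = in_[:-1]
--     return padovan_r(in_, out_)
-- ===== SOURCE B (Python) =====
-- def padovan_r(in_, out_=""):
--     rules = {"A": "B", "B": "C", "C": "AB"}
--     return "".join(rules[c] for c in in_) + out_
-- ===== Notes on version B (the rewrite author's own statement) =====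
-- stated objective: simpler
-- what changed: Replaces A's tail recursion that peels the last character and prepends its substitution with a single left-to-right join over the characters followed by one concatenation of out_.
import Mathlib
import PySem

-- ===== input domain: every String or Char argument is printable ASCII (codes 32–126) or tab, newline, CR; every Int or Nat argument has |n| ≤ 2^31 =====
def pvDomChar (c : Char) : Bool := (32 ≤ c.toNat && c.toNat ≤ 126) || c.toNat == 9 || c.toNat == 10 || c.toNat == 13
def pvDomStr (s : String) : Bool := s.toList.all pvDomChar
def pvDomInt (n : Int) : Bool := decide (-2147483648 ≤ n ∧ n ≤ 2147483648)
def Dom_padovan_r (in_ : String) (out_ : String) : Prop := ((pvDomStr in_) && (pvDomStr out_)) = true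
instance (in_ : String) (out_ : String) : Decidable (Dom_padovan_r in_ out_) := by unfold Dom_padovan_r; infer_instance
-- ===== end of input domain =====

-- B replaces A's right-to-left prepend recursion with a single left-to-right join; objective: simpler.


-- ===== PORT A =====
-- the rules dict; on Pre_ (chars in {A,B,C}) the lookup always hits; outside Pre_ Python raises KeyError
def pvRulesA (c : Char) : String :=
  if c = 'A' then "B" else if c = 'B' then "C" else "AB"

-- A's recursion: peel the last character, prepend its substitution
def pvGoA (l : List Char) (out : String) : String :=
  if h : l = [] then out
  else pvGoA l.dropLast (pvRulesA (l.getLast h) ++ out)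
termination_by l.length
decreasing_by
  have : l.length ≠ 0 := by simpa using h
  simp [List.length_dropLast]; omega

def padovan_r (in_ : String) (out_ : String) : String := pvGoA in_.toList out_

-- ===== PORT B =====
def pvRulesB (c : Char) : String :=
  if c = 'A' then "B" else if c = 'B' then "C" else "AB"

-- "".join(rules[c] for c in in_) + out_
def padovan_r_alt (in_ : String) (out_ : String) : String :=
  String.join (in_.toList.map pvRulesB) ++ out_

-- ===== PRECONDITION & SPEC =====
-- Pre_ excludes exactly the inputs on which A raises KeyError: any character of in_ outside {A,B,C}
def Pre_padovan_r (in_ : String) (out_ : String) : Prop :=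
  in_.toList.all (fun c => c = 'A' || c = 'B' || c = 'C') = true
instance (in_ : String) (out_ : String) : Decidable (Pre_padovan_r in_ out_) := by
  unfold Pre_padovan_r; infer_instance

def pvWitness_padovan_r : String × String := ("CAB", "A")

def Spec_padovan_r (in_ : String) (out_ : String) (out : String) : Prop := out = padovan_r_alt in_ out_
instance (in_ : String) (out_ : String) (out : String) : Decidable (Spec_padovan_r in_ out_ out) := by unfold Spec_padovan_r; infer_instance

-- ===== CLAIM (what is proved, stated in full; the proofs are below) =====
def Claim_equal_padovan_r : Prop := ∀ (in_ : String) (out_ : String), Dom_padovan_r in_ out_ → Pre_padovan_r in_ out_ → Spec_padovan_r in_ out_ (padovan_r in_ out_)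

-- ===== LEMMAS AND PROOFS =====

theorem pvGoA_join (l : List Char) (out : String) :
    pvGoA l out = String.join (l.map pvRulesB) ++ out := by
  induction l using List.reverseRecOn generalizing out with
  | nil => simp [pvGoA, String.join]
  | append_singleton l' a ih =>
      rw [pvGoA]
      have hne : l' ++ [a] ≠ [] := by simp
      simp only [hne, dite_false, List.dropLast_concat, List.getLast_append, List.isEmpty_cons,
        List.getLast_singleton]
      rw [ih]
      simp [String.join, List.foldl_append, String.append_assoc, pvRulesA, pvRulesB]

-- ===== VERDICT (by name: the statement is the Claim_ definition above) =====
theorem padovan_r_spec : Claim_equal_padovan_r := by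
  intro in_ out_ _ _
  unfold Spec_padovan_r padovan_r padovan_r_alt
  exact pvGoA_join _ _
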